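-- pv_equiv track=rewrite | github.com/jinyang10/Caesar-Cipher | crypto_helpers.py | pad_keyword
-- ===== SOURCE A (Python) =====
-- def pad_keyword(word, n):
--     """ (str, int) -> str
--     Returns a string of length n, obtained by concatenating characters of the input string together, until
--     the desired length is matched. Note: n can be smaller than the length of the input string. If the
--     input string is empty, raise ValueError. If n is less than 0, return ValueError (n must be greater than
--     0).
--
--     >>> pad_keyword('hi there', 5)
--     'hi th'
--     >>> pad_keyword('', 5)
--     Traceback (most recent call last):
--     ValueError: the input string should not be empty
--     >>> pad_keyword('yeet', -2)
--     Traceback (most recent call last):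
--     ValueError: the input integer should be greater than 0
--     """
--     if word in [""]:
--         raise ValueError("the input string should not be empty")
--
--     if n < 0:
--         raise ValueError("the input integer should be greater than 0")
--
--     # iterate through word[index], return each word[index] n times.
--     word_str = ""
--
--     if n < len(word):
--         for i in range(n):
--             word_str = word_str + word[i]
--
--         return word_str
--
--     if n >= len(word):
--         word_str = word_str + word * (n // len(word))
--
--         for i in range(n % len(word)):
--             word_str = word_str + word[i]
--
--
--         return word_str
-- ===== SOURCE B (Python) =====
-- def pad_keyword(word, n):
--     if word == "":
--         raise ValueError("the input string should not be empty")
--     if n < 0: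
--         raise ValueError("the input integer should be greater than 0")
--     return ''.join(word[i % len(word)] for i in range(n))
-- ===== Notes on version B (the rewrite author's own statement) =====
-- stated objective: simpler
-- what changed: Replaces A's n<len vs n>=len branching (block copies via string multiplication plus a remainder loop) with one uniform pass over range(n) indexing word[i % len(word)].
import Mathlib
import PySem

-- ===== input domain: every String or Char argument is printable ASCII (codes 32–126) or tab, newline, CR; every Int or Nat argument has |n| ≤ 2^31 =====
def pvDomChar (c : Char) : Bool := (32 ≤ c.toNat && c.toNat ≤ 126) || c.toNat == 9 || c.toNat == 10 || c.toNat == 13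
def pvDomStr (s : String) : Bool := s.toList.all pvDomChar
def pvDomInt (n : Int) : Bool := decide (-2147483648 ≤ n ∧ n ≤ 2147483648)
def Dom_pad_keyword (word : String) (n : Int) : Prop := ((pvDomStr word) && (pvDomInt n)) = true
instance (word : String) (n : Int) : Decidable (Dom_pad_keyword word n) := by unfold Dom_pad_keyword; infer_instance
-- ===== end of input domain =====

-- B replaces A's two-branch block-plus-remainder construction with one uniform pass over
-- range(n) indexing word[i % len(word)] (objective: simpler). Same guards; A's ValueError
-- cases (empty word, n < 0) are excluded by Pre_.

-- ===== PORT A =====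
def pad_keyword (word : String) (n : Int) : String :=
  if word ∈ [""] then ""          -- raise ValueError: excluded by Pre_
  else if n < 0 then ""           -- raise ValueError: excluded by Pre_
  else
    if n < (word.toList.length : Int) then
      -- for i in range(n): word_str = word_str + word[i]
      String.ofList ((PySem.List.pyRange 0 n 1).foldl
        (fun acc i => acc ++ [PySem.List.pyGetD word.toList i ' ']) [])
    else
      -- word_str = word_str + word * (n // len(word)); then for i in range(n % len(word)): + word[i]
      String.ofList ((PySem.List.pyRange 0 (PySem.Int.mod n (word.toList.length : Int)) 1).foldl
        (fun acc i => acc ++ [PySem.List.pyGetD word.toList i ' '])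
        ([] ++ PySem.List.pyRepeat word.toList (PySem.Int.floordiv n (word.toList.length : Int))))

-- ===== PORT B =====
def pad_keyword_alt (word : String) (n : Int) : String :=
  if word = "" then ""            -- raise ValueError: excluded by Pre_
  else if n < 0 then ""           -- raise ValueError: excluded by Pre_
  else
    -- ''.join(word[i % len(word)] for i in range(n))
    String.ofList ((PySem.List.pyRange 0 n 1).map
      (fun i => PySem.List.pyGetD word.toList (PySem.Int.mod i (word.toList.length : Int)) ' '))

-- ===== PRECONDITION & SPEC =====
-- Pre_ excludes exactly the inputs on which A raises ValueError: empty word, or n < 0.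
def Pre_pad_keyword (word : String) (n : Int) : Prop := word ≠ "" ∧ 0 ≤ n
instance (word : String) (n : Int) : Decidable (Pre_pad_keyword word n) := by
  unfold Pre_pad_keyword; infer_instance
def pvWitness_pad_keyword : String × Int := ("hi there", 5)

def Spec_pad_keyword (word : String) (n : Int) (out : String) : Prop := out = pad_keyword_alt word n
instance (word : String) (n : Int) (out : String) : Decidable (Spec_pad_keyword word n out) := by
  unfold Spec_pad_keyword; infer_instance

-- ===== CLAIM (what is proved, stated in full; the proofs are below) =====
def Claim_equal_pad_keyword : Prop := ∀ (word : String) (n : Int), Dom_pad_keyword word n → Pre_pad_keyword word n → Spec_pad_keyword word n (pad_keyword word n)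

-- ===== LEMMAS AND PROOFS =====

-- (range L).map (cs.getD · d) reads off cs itself.
theorem map_range_getD (cs : List Char) (d : Char) :
    (List.range cs.length).map (fun k => cs.getD k d) = cs := by
  apply List.ext_getElem (by simp)
  intro k h1 h2
  simp [List.getD_eq_getElem?_getD, List.getElem?_eq_getElem h2]

-- the cyclic read over range m splits into full blocks plus a remainder read
theorem cyc (cs : List Char) (hne : cs ≠ []) (m : Nat) :
    (List.range m).map (fun k => cs.getD (k % cs.length) ' ')
      = (List.replicate (m / cs.length) cs).flatten
        ++ (List.range (m % cs.length)).map (fun k => cs.getD k ' ') := by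
  have hL : 0 < cs.length := List.length_pos_iff.mpr hne
  induction m using Nat.strong_induction_on with
  | _ m ih =>
    by_cases hm : m < cs.length
    · rw [Nat.div_eq_of_lt hm, Nat.mod_eq_of_lt hm]
      simp only [List.replicate_zero, List.flatten_nil, List.nil_append]
      apply List.map_congr_left
      intro k hk
      rw [Nat.mod_eq_of_lt (lt_trans (List.mem_range.mp hk) hm)]
    · have hm' : cs.length ≤ m := le_of_not_gt hm
      obtain ⟨m', rfl⟩ : ∃ m', m = cs.length + m' := ⟨m - cs.length, by omega⟩
      rw [List.range_add, List.map_append, List.map_map]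
      have h1 : (List.range cs.length).map (fun k => cs.getD (k % cs.length) ' ') = cs := by
        refine Eq.trans (List.map_congr_left ?_) (map_range_getD cs ' ')
        intro k hk; rw [Nat.mod_eq_of_lt (List.mem_range.mp hk)]
      have h2 : ((fun k => cs.getD (k % cs.length) ' ') ∘ (cs.length + ·))
          = fun k => cs.getD (k % cs.length) ' ' := by
        funext k; simp [Nat.add_mod_left]
      rw [h1, h2, ih m' (by omega),
        show (cs.length + m') / cs.length = m' / cs.length + 1 by
          rw [Nat.add_div_left _ hL],
        show (cs.length + m') % cs.length = m' % cs.length by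
          rw [Nat.add_mod_left],
        List.replicate_succ, List.flatten_cons, List.append_assoc]

theorem word_toList_ne (word : String) (hw : word ≠ "") : word.toList ≠ [] := by
  intro h
  apply hw
  have := congrArg String.ofList h
  rw [String.ofList_toList] at this
  exact this.trans rfl

-- B, under the guards, as a Nat-indexed cyclic read
theorem alt_eq (word : String) (n : Int) (hw : word ≠ "") (hn : 0 ≤ n) :
    pad_keyword_alt word n
      = String.ofList ((List.range n.toNat).map
          (fun k => word.toList.getD (k % word.toList.length) ' ')) := by
  have hL : 0 < word.toList.length := List.length_pos_iff.mpr (word_toList_ne word hw)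
  unfold pad_keyword_alt
  rw [if_neg hw, if_neg (by omega)]
  apply congrArg String.ofList
  rw [PySem.List.pyRange_one, List.map_map]
  simp only [Int.sub_zero]
  apply List.map_congr_left
  intro k hk
  simp only [Function.comp_apply, zero_add]
  rw [PySem.Int.mod_natCast, PySem.List.pyGetD_natCast]

-- ===== VERDICT (by name: the statement is the Claim_ definition above) =====
theorem pad_keyword_spec : Claim_equal_pad_keyword := by
  intro word n _ hpre
  obtain ⟨hw, hn⟩ := hpre
  obtain ⟨m, rfl⟩ : ∃ m : Nat, n = (m : Int) := ⟨n.toNat, by omega⟩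
  unfold Spec_pad_keyword
  rw [alt_eq word m hw hn]
  simp only [Int.toNat_natCast]
  have hcs : word.toList ≠ [] := word_toList_ne word hw
  have hL : 0 < word.toList.length := List.length_pos_iff.mpr hcs
  unfold pad_keyword
  rw [if_neg (by simpa using hw), if_neg (by omega)]
  by_cases hsm : (m : Int) < (word.toList.length : Int)
  · rw [if_pos hsm]
    apply congrArg String.ofList
    rw [PySem.List.foldl_append_singleton_eq_map, List.nil_append,
      cyc word.toList hcs m,
      Nat.div_eq_of_lt (by omega), Nat.mod_eq_of_lt (by omega)]
    simp only [List.replicate_zero, List.flatten_nil, List.nil_append]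
    rw [PySem.List.pyRange_one, List.map_map]
    simp only [Int.sub_zero, Int.toNat_natCast]
    apply List.map_congr_left
    intro k hk
    simp only [Function.comp_apply, zero_add]
    rw [PySem.List.pyGetD_natCast]
  · rw [if_neg hsm]
    apply congrArg String.ofList
    rw [PySem.List.foldl_append_singleton_eq_map, cyc word.toList hcs m,
      PySem.Int.floordiv_natCast, PySem.Int.mod_natCast, List.nil_append]
    have hrep : PySem.List.pyRepeat word.toList ((m / word.toList.length : Nat) : Int)
        = (List.replicate (m / word.toList.length) word.toList).flatten := by
      rw [show PySem.List.pyRepeat word.toList ((m / word.toList.length : Nat) : Int)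
            = (List.replicate ((m / word.toList.length : Nat) : Int).toNat word.toList).flatten
          from rfl]
      simp only [Int.toNat_natCast]
    rw [hrep]
    congr 1
    rw [PySem.List.pyRange_one, List.map_map]
    simp only [Int.sub_zero, Int.toNat_natCast]
    apply List.map_congr_left
    intro k hk
    simp only [Function.comp_apply, zero_add]
    rw [PySem.List.pyGetD_natCast]
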